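-- pv_equiv track=rewrite | github.com/CS257-F23/team-project-b | ProductionCode/datasource.py | find_column_containing
-- ===== SOURCE A (Python) =====
-- def find_column_containing(argument:str):
--     """given an argument (ie: '2003', 'Liver', or 'Female') and returns the appropriate column that corresponds to the field."""
--     possible_states = ['Alabama', 'Alaska', 'Arizona', 'Arkansas', 'California', 'Colorado', 'Connecticut', 'Delaware', 'District of Columbia', 'Florida', 'Georgia', 'Hawaii', 'Idaho', 'Illinois', 'Indiana', 'Iowa', 'Kansas', 'Kentucky', 'Louisiana', 'Maine', 'Maryland', 'Massachusetts', 'Michigan', 'Minnesota', 'Mississippi', 'Missouri',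
--                        'Montana', 'Nebraska', 'Nevada', 'New Hampshire', 'New Jersey', 'New Mexico', 'New York', 'North Carolina', 'North Dakota', 'Ohio', 'Oklahoma', 'Oregon', 'Pennsylvania', 'Rhode Island', 'South Carolina', 'South Dakota', 'Tennessee', 'Texas', 'Utah', 'Vermont', 'Virginia', 'Washington', 'West Virginia', 'Wisconsin', 'Wyoming']
--
--     possible_years = [2000, 2001, 2002, 2003, 2004, 2005, 2006, 2007, 2008,
--                       2009, 2010, 2011, 2012, 2013, 2014, 2015, 2016, 2017, 2018, 2019, 2020]
--     possible_years = [str(year) for year in possible_years]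
--
--     possible_leading_sites = ['Brain and Other Nervous System', 'Breast', 'Cervix Uteri', 'Colon and Rectum', 'Corpus Uteri', 'Esophagus', 'Gallbladder', 'Kidney and Renal Pelvis', 'Larynx', 'Leukemias', 'Liver',
--                                 'Lung and Bronchus', 'Melanoma of the Skin', 'Myeloma', 'Non-Hodgkin Lymphoma', 'Oral Cavity and Pharynx', 'Ovary', 'Pancreas', 'Prostate', 'Stomach', 'Thyroid', 'Urinary Bladder invasive and in situ']
--
--     possible_sexes = ['Female', 'Male']
--
--     target_column = "invalid"
--     if argument in possible_states:
--         target_column = 'state_name'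
--     elif argument in possible_years:
--         target_column = 'case_year'
--     elif argument in possible_leading_sites:
--         target_column = 'leading_site'
--     elif argument in possible_sexes:
--         target_column = 'sex'
--
--     return target_column
-- ===== SOURCE B (Python) =====
-- """Single sorted value->column table searched by bisection, instead of four sequential list-membership branches."""
-- _TABLE = [
--     ('2000', 'case_year'),
--     ('2001', 'case_year'),
--     ('2002', 'case_year'),
--     ('2003', 'case_year'),
--     ('2004', 'case_year'),
--     ('2005', 'case_year'),
--     ('2006', 'case_year'),
--     ('2007', 'case_year'),
--     ('2008', 'case_year'),
--     ('2009', 'case_year'),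
--     ('2010', 'case_year'),
--     ('2011', 'case_year'),
--     ('2012', 'case_year'),
--     ('2013', 'case_year'),
--     ('2014', 'case_year'),
--     ('2015', 'case_year'),
--     ('2016', 'case_year'),
--     ('2017', 'case_year'),
--     ('2018', 'case_year'),
--     ('2019', 'case_year'),
--     ('2020', 'case_year'),
--     ('Alabama', 'state_name'),
--     ('Alaska', 'state_name'),
--     ('Arizona', 'state_name'),
--     ('Arkansas', 'state_name'),
--     ('Brain and Other Nervous System', 'leading_site'),
--     ('Breast', 'leading_site'),
--     ('California', 'state_name'),
--     ('Cervix Uteri', 'leading_site'),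
--     ('Colon and Rectum', 'leading_site'),
--     ('Colorado', 'state_name'),
--     ('Connecticut', 'state_name'),
--     ('Corpus Uteri', 'leading_site'),
--     ('Delaware', 'state_name'),
--     ('District of Columbia', 'state_name'),
--     ('Esophagus', 'leading_site'),
--     ('Female', 'sex'),
--     ('Florida', 'state_name'),
--     ('Gallbladder', 'leading_site'),
--     ('Georgia', 'state_name'),
--     ('Hawaii', 'state_name'),
--     ('Idaho', 'state_name'),
--     ('Illinois', 'state_name'),
--     ('Indiana', 'state_name'),
--     ('Iowa', 'state_name'),
--     ('Kansas', 'state_name'),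
--     ('Kentucky', 'state_name'),
--     ('Kidney and Renal Pelvis', 'leading_site'),
--     ('Larynx', 'leading_site'),
--     ('Leukemias', 'leading_site'),
--     ('Liver', 'leading_site'),
--     ('Louisiana', 'state_name'),
--     ('Lung and Bronchus', 'leading_site'),
--     ('Maine', 'state_name'),
--     ('Male', 'sex'),
--     ('Maryland', 'state_name'),
--     ('Massachusetts', 'state_name'),
--     ('Melanoma of the Skin', 'leading_site'),
--     ('Michigan', 'state_name'),
--     ('Minnesota', 'state_name'),
--     ('Mississippi', 'state_name'),
--     ('Missouri', 'state_name'),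
--     ('Montana', 'state_name'),
--     ('Myeloma', 'leading_site'),
--     ('Nebraska', 'state_name'),
--     ('Nevada', 'state_name'),
--     ('New Hampshire', 'state_name'),
--     ('New Jersey', 'state_name'),
--     ('New Mexico', 'state_name'),
--     ('New York', 'state_name'),
--     ('Non-Hodgkin Lymphoma', 'leading_site'),
--     ('North Carolina', 'state_name'),
--     ('North Dakota', 'state_name'),
--     ('Ohio', 'state_name'),
--     ('Oklahoma', 'state_name'),
--     ('Oral Cavity and Pharynx', 'leading_site'),
--     ('Oregon', 'state_name'),
--     ('Ovary', 'leading_site'),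
--     ('Pancreas', 'leading_site'),
--     ('Pennsylvania', 'state_name'),
--     ('Prostate', 'leading_site'),
--     ('Rhode Island', 'state_name'),
--     ('South Carolina', 'state_name'),
--     ('South Dakota', 'state_name'),
--     ('Stomach', 'leading_site'),
--     ('Tennessee', 'state_name'),
--     ('Texas', 'state_name'),
--     ('Thyroid', 'leading_site'),
--     ('Urinary Bladder invasive and in situ', 'leading_site'),
--     ('Utah', 'state_name'),
--     ('Vermont', 'state_name'),
--     ('Virginia', 'state_name'),
--     ('Washington', 'state_name'),
--     ('West Virginia', 'state_name'),
--     ('Wisconsin', 'state_name'),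
--     ('Wyoming', 'state_name'),
-- ]
--
-- def find_column_containing(argument: str):
--     """given an argument (ie: '2003', 'Liver', or 'Female') and returns the appropriate column that corresponds to the field."""
--     lo, hi = 0, len(_TABLE)
--     while lo < hi:
--         mid = (lo + hi) // 2
--         key, column = _TABLE[mid]
--         if key == argument:
--             return column
--         if key < argument:
--             lo = mid + 1
--         else:
--             hi = mid
--     return 'invalid'
-- ===== Notes on version B (the rewrite author's own statement) =====
-- stated objective: alternative
-- what changed: Replaces the four sequential list-membership if/elif branches by one pre-sorted value-to-column table searched with a hand-written binary-search loop (O(log n) comparisons, no linear scans); the four value sets are disjoint so the single table reproduces A exactly.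
import Mathlib
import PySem

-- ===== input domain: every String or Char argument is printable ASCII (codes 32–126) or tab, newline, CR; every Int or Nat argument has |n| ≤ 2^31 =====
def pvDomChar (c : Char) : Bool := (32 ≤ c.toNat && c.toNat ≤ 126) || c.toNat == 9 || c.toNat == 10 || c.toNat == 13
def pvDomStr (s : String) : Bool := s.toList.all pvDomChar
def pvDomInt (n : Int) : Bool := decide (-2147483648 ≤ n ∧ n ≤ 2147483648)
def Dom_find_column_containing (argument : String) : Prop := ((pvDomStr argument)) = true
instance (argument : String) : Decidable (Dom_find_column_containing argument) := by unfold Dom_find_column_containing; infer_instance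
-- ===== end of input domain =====

-- B replaces A's four sequential list-membership branches by binary search over one
-- pre-sorted value→column table (objective: alternative algorithm); return value only.

-- ===== PORT A =====
def pvStates : List String := ["Alabama", "Alaska", "Arizona", "Arkansas", "California", "Colorado", "Connecticut", "Delaware", "District of Columbia", "Florida", "Georgia", "Hawaii", "Idaho", "Illinois", "Indiana", "Iowa", "Kansas", "Kentucky", "Louisiana", "Maine", "Maryland", "Massachusetts", "Michigan", "Minnesota", "Mississippi", "Missouri", "Montana", "Nebraska", "Nevada", "New Hampshire", "New Jersey", "New Mexico", "New York", "North Carolina", "North Dakota", "Ohio", "Oklahoma", "Oregon", "Pennsylvania", "Rhode Island", "South Carolina", "South Dakota", "Tennessee", "Texas", "Utah", "Vermont", "Virginia", "Washington", "West Virginia", "Wisconsin", "Wyoming"]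

def pvSites : List String := ["Brain and Other Nervous System", "Breast", "Cervix Uteri", "Colon and Rectum", "Corpus Uteri", "Esophagus", "Gallbladder", "Kidney and Renal Pelvis", "Larynx", "Leukemias", "Liver", "Lung and Bronchus", "Melanoma of the Skin", "Myeloma", "Non-Hodgkin Lymphoma", "Oral Cavity and Pharynx", "Ovary", "Pancreas", "Prostate", "Stomach", "Thyroid", "Urinary Bladder invasive and in situ"]

def find_column_containing (argument : String) : String :=
  let possible_states := pvStates
  let possible_years : List Int := [2000, 2001, 2002, 2003, 2004, 2005, 2006, 2007, 2008, 2009, 2010, 2011, 2012, 2013, 2014, 2015, 2016, 2017, 2018, 2019, 2020]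
  let possible_years := possible_years.map PySem.Int.toStr
  let possible_leading_sites := pvSites
  let possible_sexes : List String := ["Female", "Male"]
  let target_column := "invalid"
  if argument ∈ possible_states then "state_name"
  else if argument ∈ possible_years then "case_year"
  else if argument ∈ possible_leading_sites then "leading_site"
  else if argument ∈ possible_sexes then "sex"
  else target_column

-- ===== PORT B =====
-- Source B's module-level _TABLE: the 96 (value, column) pairs already sorted by key.
def pvTable : List (String × String) := [("2000", "case_year"), ("2001", "case_year"), ("2002", "case_year"), ("2003", "case_year"), ("2004", "case_year"), ("2005", "case_year"), ("2006", "case_year"), ("2007", "case_year"), ("2008", "case_year"), ("2009", "case_year"), ("2010", "case_year"), ("2011", "case_year"), ("2012", "case_year"), ("2013", "case_year"), ("2014", "case_year"), ("2015", "case_year"), ("2016", "case_year"), ("2017", "case_year"), ("2018", "case_year"), ("2019", "case_year"), ("2020", "case_year"), ("Alabama", "state_name"), ("Alaska", "state_name"), ("Arizona", "state_name"), ("Arkansas", "state_name"), ("Brain and Other Nervous System", "leading_site"), ("Breast", "leading_site"), ("California", "state_name"), ("Cervix Uteri", "leading_site"), ("Colon and Rectum", "leading_site"), ("Colorado", "state_name"),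 ("Connecticut", "state_name"), ("Corpus Uteri", "leading_site"), ("Delaware", "state_name"), ("District of Columbia", "state_name"), ("Esophagus", "leading_site"), ("Female", "sex"), ("Florida", "state_name"), ("Gallbladder", "leading_site"), ("Georgia", "state_name"), ("Hawaii", "state_name"), ("Idaho", "state_name"), ("Illinois", "state_name"), ("Indiana", "state_name"), ("Iowa", "state_name"), ("Kansas", "state_name"), ("Kentucky", "state_name"), ("Kidney and Renal Pelvis", "leading_site"), ("Larynx", "leading_site"), ("Leukemias", "leading_site"), ("Liver", "leading_site"), ("Louisiana", "state_name"), ("Lung and Bronchus", "leading_site"), ("Maine", "state_name"), ("Male", "sex"), ("Maryland", "state_name"), ("Massachusetts", "state_name"), ("Melanoma of the Skin", "leading_site"), ("Michigan", "state_name"), ("Minnesota", "state_name"), ("Mississippi", "state_name"), ("Missouri", "state_name"), ("Montana", "state_name"), ("Myeloma", "leading_site"), ("Nebraska", "state_name"), ("Nevada", "state_name"), ("New Hampshire", "state_name"), ("New Jersey", "state_name"), ("New Mexico", "state_name"), ("New York", "state_name"), ("Non-Hodgkin Lymphoma", "leading_site"), ("North Carolina", "state_name"), ("North Dakota", "state_name"),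 ("Ohio", "state_name"), ("Oklahoma", "state_name"), ("Oral Cavity and Pharynx", "leading_site"), ("Oregon", "state_name"), ("Ovary", "leading_site"), ("Pancreas", "leading_site"), ("Pennsylvania", "state_name"), ("Prostate", "leading_site"), ("Rhode Island", "state_name"), ("South Carolina", "state_name"), ("South Dakota", "state_name"), ("Stomach", "leading_site"), ("Tennessee", "state_name"), ("Texas", "state_name"), ("Thyroid", "leading_site"), ("Urinary Bladder invasive and in situ", "leading_site"), ("Utah", "state_name"), ("Vermont", "state_name"), ("Virginia", "state_name"), ("Washington", "state_name"), ("West Virginia", "state_name"), ("Wisconsin", "state_name"), ("Wyoming", "state_name")]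

-- Source B's while-loop, as recursion on hi - lo.  _TABLE[mid] is ported with getD:
-- the loop keeps 0 ≤ lo ≤ mid < hi ≤ len, so the index is always in range and
-- the default is never used (exact).  String '<' is code-point lexicographic in
-- both Python and Lean.
def pvBsearch (t : List (String × String)) (k : String) (lo hi : Nat) : Option String :=
  if _h : lo < hi then
    let mid := (lo + hi) / 2
    let p := t.getD mid ("", "")
    if p.1 = k then some p.2
    else if p.1 < k then pvBsearch t k (mid + 1) hi
    else pvBsearch t k lo mid
  else none
termination_by hi - lo
decreasing_by all_goals omega

def find_column_containing_alt (argument : String) : String :=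
  (pvBsearch pvTable argument 0 pvTable.length).getD "invalid"

-- ===== PRECONDITION & SPEC =====
def Spec_find_column_containing (argument : String) (out : String) : Prop := out = find_column_containing_alt argument
instance (argument : String) (out : String) : Decidable (Spec_find_column_containing argument out) := by unfold Spec_find_column_containing; infer_instance

-- ===== CLAIM (what is proved, stated in full; the proofs are below) =====
def Claim_equal_find_column_containing : Prop := ∀ (argument : String), Dom_find_column_containing argument → Spec_find_column_containing argument (find_column_containing argument)

-- ===== LEMMAS AND PROOFS =====

def pvYears : List String := ["2000", "2001", "2002", "2003", "2004", "2005", "2006", "2007", "2008", "2009", "2010", "2011", "2012", "2013", "2014", "2015", "2016", "2017", "2018", "2019", "2020"]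

-- the four categories in A's order, as one association list
def pvAllPairs : List (String × String) := [("Alabama", "state_name"), ("Alaska", "state_name"), ("Arizona", "state_name"), ("Arkansas", "state_name"), ("California", "state_name"), ("Colorado", "state_name"), ("Connecticut", "state_name"), ("Delaware", "state_name"), ("District of Columbia", "state_name"), ("Florida", "state_name"), ("Georgia", "state_name"), ("Hawaii", "state_name"), ("Idaho", "state_name"), ("Illinois", "state_name"), ("Indiana", "state_name"), ("Iowa", "state_name"), ("Kansas", "state_name"), ("Kentucky", "state_name"), ("Louisiana", "state_name"), ("Maine", "state_name"), ("Maryland", "state_name"), ("Massachusetts", "state_name"), ("Michigan", "state_name"), ("Minnesota", "state_name"), ("Mississippi", "state_name"), ("Missouri", "state_name"), ("Montana", "state_name"), ("Nebraska", "state_name"), ("Nevada", "state_name"), ("New Hampshire", "state_name"), ("New Jersey", "state_name"), ("New Mexico", "state_name"), ("New York", "state_name"), ("North Carolina", "state_name"), ("North Dakota", "state_name"), ("Ohio", "state_name"), ("Oklahoma", "state_name"), ("Oregon", "state_name"), ("Pennsylvania", "state_name"), ("Rhode Island", "state_name"), ("South Carolina", "state_name"), ("South Dakota", "state_name"), ("Tennessee",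 "state_name"), ("Texas", "state_name"), ("Utah", "state_name"), ("Vermont", "state_name"), ("Virginia", "state_name"), ("Washington", "state_name"), ("West Virginia", "state_name"), ("Wisconsin", "state_name"), ("Wyoming", "state_name"), ("2000", "case_year"), ("2001", "case_year"), ("2002", "case_year"), ("2003", "case_year"), ("2004", "case_year"), ("2005", "case_year"), ("2006", "case_year"), ("2007", "case_year"), ("2008", "case_year"), ("2009", "case_year"), ("2010", "case_year"), ("2011", "case_year"), ("2012", "case_year"), ("2013", "case_year"), ("2014", "case_year"), ("2015", "case_year"), ("2016", "case_year"), ("2017", "case_year"), ("2018", "case_year"), ("2019", "case_year"), ("2020", "case_year"), ("Brain and Other Nervous System", "leading_site"), ("Breast", "leading_site"), ("Cervix Uteri", "leading_site"), ("Colon and Rectum", "leading_site"), ("Corpus Uteri", "leading_site"), ("Esophagus", "leading_site"), ("Gallbladder", "leading_site"), ("Kidney and Renal Pelvis", "leading_site"), ("Larynx", "leading_site"), ("Leukemias", "leading_site"), ("Liver", "leading_site"), ("Lung and Bronchus", "leading_site"), ("Melanoma of the Skin", "leading_site"), ("Myeloma", "leading_site"), ("Non-Hodgkin Lymphoma", "leading_site"),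 ("Oral Cavity and Pharynx", "leading_site"), ("Ovary", "leading_site"), ("Pancreas", "leading_site"), ("Prostate", "leading_site"), ("Stomach", "leading_site"), ("Thyroid", "leading_site"), ("Urinary Bladder invasive and in situ", "leading_site"), ("Female", "sex"), ("Male", "sex")]

theorem pvYearsA_eq : (([2000, 2001, 2002, 2003, 2004, 2005, 2006, 2007, 2008, 2009, 2010, 2011, 2012, 2013, 2014, 2015, 2016, 2017, 2018, 2019, 2020] : List Int).map PySem.Int.toStr) = pvYears := by decide

set_option maxRecDepth 8000 in
theorem pvTable_sorted : (pvTable.map Prod.fst).Pairwise (· < ·) := by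
  have h : ((pvTable.map Prod.fst).map String.toList).IsChain (· < ·) := by decide
  rw [List.isChain_iff_pairwise, List.pairwise_map] at h
  exact h.imp (fun hl => String.lt_iff_toList_lt.2 hl)

theorem pvTable_perm : pvTable.Perm pvAllPairs := by decide

theorem pvAllPairs_eq : pvAllPairs = pvStates.map (·, "state_name") ++ pvYears.map (·, "case_year") ++ pvSites.map (·, "leading_site") ++ (["Female", "Male"] : List String).map (·, "sex") := by decide

-- association-list lookup: helper lemmas
theorem lookup_none {t : List (String × String)} {k : String}
    (h : ∀ p ∈ t, p.1 ≠ k) : List.lookup k t = none := by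
  induction t with
  | nil => rfl
  | cons p t ih =>
      have hp : (k == p.1) = false :=
        beq_eq_false_iff_ne.mpr (Ne.symm (h p (List.mem_cons_self ..)))
      rw [List.lookup, hp]
      exact ih (fun q hq => h q (List.mem_cons_of_mem _ hq))

theorem lookup_some {t : List (String × String)} {k c : String}
    (hnd : (t.map Prod.fst).Nodup) (hm : (k, c) ∈ t) : List.lookup k t = some c := by
  induction t with
  | nil => simp at hm
  | cons p t ih =>
      rw [List.map_cons, List.nodup_cons] at hnd
      rcases List.mem_cons.1 hm with h | h
      · rw [← h]; simp [List.lookup]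
      · have hk : (k == p.1) = false := by
          have hkm : k ∈ t.map Prod.fst := List.mem_map_of_mem h
          exact beq_eq_false_iff_ne.mpr (fun e => hnd.1 (e ▸ hkm))
        rw [List.lookup, hk]
        exact ih hnd.2 h

-- strict monotonicity of the sorted keys
theorem keys_lt {t : List (String × String)}
    (hs : (t.map Prod.fst).Pairwise (· < ·)) {i j : Nat}
    (hi : i < t.length) (hj : j < t.length) (hij : i < j) : t[i].1 < t[j].1 := by
  have := List.pairwise_iff_getElem.1 hs i j (by simpa) (by simpa) hij
  simpa using this

-- exhausted window: the invariants force every key away from k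
theorem lookup_none_of_closed {t : List (String × String)} {k : String} {lo hi : Nat}
    (hle : hi ≤ lo)
    (hlow : ∀ i, i < lo → ∀ h : i < t.length, t[i].1 < k)
    (hhigh : ∀ i, hi ≤ i → ∀ h : i < t.length, k < t[i].1) :
    List.lookup k t = none := by
  apply lookup_none
  intro p hp
  obtain ⟨i, hil, rfl⟩ := List.mem_iff_getElem.1 hp
  by_cases hi : i < lo
  · exact ne_of_lt (hlow i hi hil)
  · exact ne_of_gt (hhigh i (by omega) hil)

-- binary search over a strictly key-sorted window equals association-list lookup
theorem bsearch_eq_lookup (t : List (String × String)) (k : String)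
    (hs : (t.map Prod.fst).Pairwise (· < ·)) :
    ∀ n lo hi, hi - lo ≤ n → hi ≤ t.length →
      (∀ i, i < lo → ∀ h : i < t.length, t[i].1 < k) →
      (∀ i, hi ≤ i → ∀ h : i < t.length, k < t[i].1) →
      pvBsearch t k lo hi = List.lookup k t := by
  intro n
  induction n with
  | zero =>
      intro lo hi hn hlen hlow hhigh
      rw [pvBsearch]
      simp only [show ¬ lo < hi by omega, dite_false]
      exact (lookup_none_of_closed (by omega) hlow hhigh).symm
  | succ n ih =>
      intro lo hi hn hlen hlow hhigh
      rw [pvBsearch]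
      by_cases hlh : lo < hi
      · simp only [hlh, dite_true]
        have hmid : (lo + hi) / 2 < t.length := by omega
        have hget : t.getD ((lo + hi) / 2) ("", "") = t[(lo + hi) / 2] :=
          List.getD_eq_getElem t _ hmid
        rw [hget]
        by_cases heq : t[(lo + hi) / 2].1 = k
        · simp only [heq, if_true]
          have hnd : (t.map Prod.fst).Nodup := hs.imp (fun h => ne_of_lt h)
          have hm : (k, t[(lo + hi) / 2].2) ∈ t := by
            have := List.getElem_mem hmid
            rwa [show t[(lo + hi) / 2] = (k, t[(lo + hi) / 2].2) by
              rw [← heq]] at this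
          exact (lookup_some hnd hm).symm
        · simp only [heq, if_false]
          by_cases hlt : t[(lo + hi) / 2].1 < k
          · simp only [hlt, if_true]
            apply ih ((lo + hi) / 2 + 1) hi (by omega) hlen _ hhigh
            intro i hilt hil
            by_cases hi2 : i = (lo + hi) / 2
            · subst hi2; exact hlt
            · exact lt_trans (keys_lt hs hil hmid (by omega)) hlt
          · simp only [hlt, if_false]
            have hgt : k < t[(lo + hi) / 2].1 := by
              rcases lt_trichotomy (t[(lo + hi) / 2].1) k with h | h | h
              · exact absurd h hlt
              · exact absurd h heq
              · exact h
            apply ih lo ((lo + hi) / 2) (by omega) (by omega) hlow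
            intro i hile hil
            by_cases hi2 : i = (lo + hi) / 2
            · subst hi2; exact hgt
            · exact lt_trans hgt (keys_lt hs hmid hil (by omega))
      · simp only [hlh, dite_false]
        exact (lookup_none_of_closed (by omega) hlow hhigh).symm

-- B as an association-list lookup over the table
theorem alt_eq_lookup (k : String) :
    find_column_containing_alt k = (List.lookup k pvTable).getD "invalid" := by
  unfold find_column_containing_alt
  rw [bsearch_eq_lookup pvTable k pvTable_sorted pvTable.length 0 pvTable.length
    (by omega) (le_refl _) (by omega) (by intro i h1 h2; omega)]

theorem pvTable_nodup_keys : (pvTable.map Prod.fst).Nodup :=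
  pvTable_sorted.imp (fun h => ne_of_lt h)

theorem mem_table_iff (k c : String) : (k, c) ∈ pvTable ↔ (k, c) ∈ pvAllPairs :=
  pvTable_perm.mem_iff

-- ===== VERDICT (by name: the statement is the Claim_ definition above) =====
theorem find_column_containing_spec : Claim_equal_find_column_containing := by
  intro k _
  unfold Spec_find_column_containing
  rw [alt_eq_lookup]
  simp only [find_column_containing, pvYearsA_eq]
  by_cases h1 : k ∈ pvStates
  · have hm : (k, "state_name") ∈ pvTable := by
      rw [mem_table_iff, pvAllPairs_eq]
      simp only [List.mem_append, List.mem_map]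
      exact Or.inl (Or.inl (Or.inl ⟨k, h1, rfl⟩))
    rw [lookup_some pvTable_nodup_keys hm]
    simp [h1]
  · by_cases h2 : k ∈ pvYears
    · have hm : (k, "case_year") ∈ pvTable := by
        rw [mem_table_iff, pvAllPairs_eq]
        simp only [List.mem_append, List.mem_map]
        exact Or.inl (Or.inl (Or.inr ⟨k, h2, rfl⟩))
      rw [lookup_some pvTable_nodup_keys hm]
      simp [h1, h2]
    · by_cases h3 : k ∈ pvSites
      · have hm : (k, "leading_site") ∈ pvTable := by
          rw [mem_table_iff, pvAllPairs_eq]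
          simp only [List.mem_append, List.mem_map]
          exact Or.inl (Or.inr ⟨k, h3, rfl⟩)
        rw [lookup_some pvTable_nodup_keys hm]
        simp [h1, h2, h3]
      · by_cases h4 : k ∈ (["Female", "Male"] : List String)
        · have hm : (k, "sex") ∈ pvTable := by
            rw [mem_table_iff, pvAllPairs_eq]
            simp only [List.mem_append, List.mem_map]
            exact Or.inr ⟨k, h4, rfl⟩
          rw [lookup_some pvTable_nodup_keys hm]
          simp [h1, h2, h3, h4]
        · have hn : List.lookup k pvTable = none := by
            apply lookup_none
            intro p hp
            have hp2 : p ∈ pvAllPairs := (pvTable_perm.mem_iff).1 hp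
            rw [pvAllPairs_eq] at hp2
            simp only [List.mem_append, List.mem_map] at hp2
            rcases hp2 with ((⟨x, hx, rfl⟩ | ⟨x, hx, rfl⟩) | ⟨x, hx, rfl⟩) | ⟨x, hx, rfl⟩ <;>
              (rintro rfl; first | exact h1 hx | exact h2 hx | exact h3 hx | exact h4 hx)
          rw [hn]
          simp [h1, h2, h3, h4]
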